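-- pv_equiv track=rewrite | github.com/Rishabh-creator601/BankingSystem_Assignment- | main part 2.py | validate_apartment_id
-- ===== SOURCE A (Python) =====
-- def validate_apartment_id(apt_id):
--     if not apt_id.startswith("U"):
--         return False
--     # Remove leading 'U' and split number from building name
--     num_part = ""
--     i = 1
--     while i < len(apt_id) and apt_id[i].isdigit():
--         num_part += apt_id[i]
--         i += 1
--     building_part = apt_id[i:].lower()
--     if not num_part.isdigit() or building_part not in ["swan", "goose", "duck"]:
--         return False
--     return True
-- ===== SOURCE B (Python) =====
-- def validate_apartment_id(apt_id):
--     if not apt_id.startswith("U"):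
--         return False
--     rest = apt_id[1:]
--     for name in ("swan", "goose", "duck"):
--         if rest.lower().endswith(name):
--             return rest[:-len(name)].isdigit()
--     return False
-- ===== Notes on version B (the rewrite author's own statement) =====
-- stated objective: alternative
-- what changed: Instead of scanning the digit run forward and comparing the remainder against the building list, B strips the leading marker character and tests each building name as a case-insensitive suffix of the remainder, then checks the prefix with .isdigit(); the forward char-scan loop disappears.
import Mathlib
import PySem

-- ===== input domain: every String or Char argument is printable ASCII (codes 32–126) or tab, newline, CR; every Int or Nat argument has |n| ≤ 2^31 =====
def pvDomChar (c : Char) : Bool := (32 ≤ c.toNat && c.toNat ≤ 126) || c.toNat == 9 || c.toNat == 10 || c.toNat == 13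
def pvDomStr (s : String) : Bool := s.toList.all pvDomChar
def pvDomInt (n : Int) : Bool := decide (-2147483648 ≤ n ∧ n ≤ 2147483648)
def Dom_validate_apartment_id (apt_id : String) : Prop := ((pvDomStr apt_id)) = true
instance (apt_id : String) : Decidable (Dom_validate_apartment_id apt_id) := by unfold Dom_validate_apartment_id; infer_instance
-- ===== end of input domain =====

-- B replaces A's forward digit-scan-then-compare with a suffix-first decomposition: test each
-- building name as a case-insensitive suffix of the remainder after the marker prefix, then
-- .isdigit() on what precedes it (alternative decomposition, same cost).

-- ===== PORT A =====
-- the while loop of A: consume digits from index 1 onward, returning (num_part, remaining chars)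
def pvScanA : List Char → List Char × List Char
  | [] => ([], [])
  | c :: cs =>
    if PySem.Chars.isdigit c then
      let r := pvScanA cs
      (c :: r.1, r.2)
    else ([], c :: cs)

def validate_apartment_id (apt_id : String) : Bool :=
  if !PySem.Str.startswith apt_id "U" then false
  else
    let r := pvScanA (apt_id.toList.drop 1)
    let building_part := PySem.Chars.lower r.2
    if !PySem.Chars.strIsdigit r.1
        || !(["swan".toList, "goose".toList, "duck".toList].contains building_part) then false
    else true

-- ===== PORT B =====
-- the for loop of B over the building names; rest.take (rest.length - name.length) is exact for
-- Python's rest[:-len(name)] here since it only runs under the endswith guard (name ≠ "")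
def pvCheckB (rest : List Char) : List (List Char) → Bool
  | [] => false
  | name :: names =>
    if PySem.Chars.endswith (PySem.Chars.lower rest) name then
      PySem.Chars.strIsdigit (rest.take (rest.length - name.length))
    else pvCheckB rest names

def validate_apartment_id_alt (apt_id : String) : Bool :=
  if !PySem.Str.startswith apt_id "U" then false
  else pvCheckB (apt_id.toList.drop 1) ["swan".toList, "goose".toList, "duck".toList]

-- ===== PRECONDITION & SPEC =====
def Spec_validate_apartment_id (apt_id : String) (out : Bool) : Prop := out = validate_apartment_id_alt apt_id
instance (apt_id : String) (out : Bool) : Decidable (Spec_validate_apartment_id apt_id out) := by unfold Spec_validate_apartment_id; infer_instance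

-- ===== CLAIM (what is proved, stated in full; the proofs are below) =====
def Claim_equal_validate_apartment_id : Prop := ∀ (apt_id : String), Dom_validate_apartment_id apt_id → Spec_validate_apartment_id apt_id (validate_apartment_id apt_id)

-- ===== LEMMAS AND PROOFS =====

theorem pvScanA_eq (cs : List Char) :
    pvScanA cs = (cs.takeWhile PySem.Chars.isdigit, cs.dropWhile PySem.Chars.isdigit) := by
  induction cs with
  | nil => rfl
  | cons c cs ih =>
    simp only [pvScanA, List.takeWhile, List.dropWhile]
    by_cases h : PySem.Chars.isdigit c <;> simp [h, ih]

-- a digit is not uppercase, so lowering keeps it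
theorem pv_lower_digit (c : Char) (h : PySem.Chars.isdigit c = true) :
    PySem.Chars.lowerChar c = c := by
  simp only [PySem.Chars.isdigit, Bool.and_eq_true, decide_eq_true_eq] at h
  simp only [PySem.Chars.lowerChar, PySem.Chars.isupper, Bool.and_eq_true, decide_eq_true_eq]
  split
  · next hu => exact absurd (le_trans hu.1 h.2) (by decide)
  · rfl

-- a char whose lowering is a lowercase letter is itself no digit
theorem pv_not_digit_of_lower_letter {h : Char} (hhi : 97 ≤ h.toNat) :
    ∀ c, PySem.Chars.lowerChar c = h → PySem.Chars.isdigit c = false := by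
  intro c hc
  by_contra hdig
  simp only [Bool.not_eq_false] at hdig
  have hle : c ≤ '9' := by
    simp only [PySem.Chars.isdigit, Bool.and_eq_true, decide_eq_true_eq] at hdig
    exact hdig.2
  rw [pv_lower_digit c hdig] at hc
  subst hc
  have h3 : c.val.toNat ≤ ('9' : Char).val.toNat := UInt32.le_iff_toNat_le.mp (Char.le_def.mp hle)
  have h4 : ('9' : Char).val.toNat = 57 := by decide
  have h5 : c.toNat ≤ 57 := by rw [← h4]; exact h3
  omega

-- KEY LEMMA: when the name n = h :: tl is a suffix of lower rest and no char lowers to its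
-- head h while being a digit, B's branch value equals A's "digits && remainder == name" form.
theorem pv_key (rest n : List Char) (h : Char) (tl : List Char) (hn : n = h :: tl)
    (hh : ∀ c, PySem.Chars.lowerChar c = h → PySem.Chars.isdigit c = false)
    (hsuf : n <:+ PySem.Chars.lower rest) :
    PySem.Chars.strIsdigit (rest.take (rest.length - n.length)) =
      (PySem.Chars.strIsdigit (rest.takeWhile PySem.Chars.isdigit)
        && (PySem.Chars.lower (rest.dropWhile PySem.Chars.isdigit) == n)) := by
  subst hn
  obtain ⟨u, hu⟩ := hsuf
  have hlens : u.length + (tl.length + 1) = rest.length := by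
    have := congrArg List.length hu
    simpa [PySem.Chars.lower] using this
  set k := rest.length - (h :: tl).length with hk
  have hk2 : k = rest.length - (tl.length + 1) := by rw [hk]; simp
  have hulen : u.length = k := by omega
  have hmapdrop : PySem.Chars.lower (rest.drop k) = (h :: tl) := by
    have hx : (PySem.Chars.lower rest).drop k = (h :: tl) := by
      rw [← hu, ← hulen, List.drop_left]
    simpa [PySem.Chars.lower, List.map_drop] using hx
  obtain ⟨c, s', hcs⟩ : ∃ c s', rest.drop k = c :: s' := by
    cases hx : rest.drop k with
    | nil => rw [hx] at hmapdrop; simp [PySem.Chars.lower] at hmapdrop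
    | cons a b => exact ⟨a, b, rfl⟩
  have hlw : PySem.Chars.lower (c :: s') = (h :: tl) := hcs ▸ hmapdrop
  have hc : PySem.Chars.lowerChar c = h := by
    have hy := hlw
    simp only [PySem.Chars.lower, List.map_cons, List.cons.injEq] at hy
    exact hy.1
  have hdc : PySem.Chars.isdigit c = false := hh c hc
  have hsplit : rest = rest.take k ++ (c :: s') := by rw [← hcs, List.take_append_drop]
  set p := rest.take k with hp
  have hplen : p.length = k := by
    simp [hp, List.length_take]; omega
  by_cases hall : ∀ a ∈ p, PySem.Chars.isdigit a = true
  · -- the prefix is all digits: takeWhile eats exactly p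
    have htw : rest.takeWhile PySem.Chars.isdigit = p := by
      conv_lhs => rw [hsplit]
      rw [List.takeWhile_append]
      have hself : p.takeWhile PySem.Chars.isdigit = p := List.takeWhile_eq_self_iff.mpr hall
      simp [hself, List.takeWhile, hdc]
    have hdw : rest.dropWhile PySem.Chars.isdigit = c :: s' := by
      have h1 : rest.takeWhile PySem.Chars.isdigit ++ rest.dropWhile PySem.Chars.isdigit = rest :=
        List.takeWhile_append_dropWhile
      rw [htw] at h1
      exact List.append_cancel_left (h1.trans hsplit)
    rw [htw, hdw, hlw]
    simp
  · -- a non-digit sits inside the prefix: both sides are false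
    have hlhs : PySem.Chars.strIsdigit p = false := by
      simp only [PySem.Chars.strIsdigit, Bool.and_eq_false_iff]
      right; simpa [List.all_eq_true] using hall
    rw [hlhs]
    by_cases heq : PySem.Chars.lower (rest.dropWhile PySem.Chars.isdigit) = (h :: tl)
    · exfalso
      have hwlen : (rest.dropWhile PySem.Chars.isdigit).length = tl.length + 1 := by
        have := congrArg List.length heq
        simpa [PySem.Chars.lower] using this
      have htwlen : (rest.takeWhile PySem.Chars.isdigit).length = k := by
        have h1 := congrArg List.length
          (List.takeWhile_append_dropWhile (p := PySem.Chars.isdigit) (l := rest))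
        simp only [List.length_append] at h1
        omega
      have htwp : rest.takeWhile PySem.Chars.isdigit = p := by
        have hpre : rest.takeWhile PySem.Chars.isdigit <+: rest := List.takeWhile_prefix _
        have hq : rest.takeWhile PySem.Chars.isdigit =
            rest.take (rest.takeWhile PySem.Chars.isdigit).length :=
          List.prefix_iff_eq_take.mp hpre
        rw [hq, htwlen, hp]
      have hc2 : ∀ a ∈ p, PySem.Chars.isdigit a = true := by
        intro a ha
        rw [← htwp] at ha
        exact List.mem_takeWhile_imp ha
      exact hall hc2
    · simp [heq]

-- a suffix of rest lowers to a suffix of lower rest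
theorem pv_suffix_lower (rest w : List Char) (hw : w <:+ rest) :
    PySem.Chars.lower w <:+ PySem.Chars.lower rest := by
  simpa [PySem.Chars.lower] using List.IsSuffix.map PySem.Chars.lowerChar hw

-- two of the three names cannot both be suffixes of the same list
theorem pv_excl {x a b : List Char} (ha : a <:+ x) (hb : b <:+ x)
    (hle : a.length ≤ b.length) (hns : ¬ a <:+ b) : False :=
  hns (List.suffix_of_suffix_length_le ha hb hle)

theorem pv_bool_if (a b : Bool) : (if (!a || !b) = true then false else true) = (a && b) := by
  cases a <;> cases b <;> rfl

theorem pv_contains_eq (x : List Char) :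
    (["swan".toList, "goose".toList, "duck".toList].contains x)
      = ((x == "swan".toList) || (x == "goose".toList) || (x == "duck".toList)) := by
  by_cases h1 : x = "swan".toList <;> by_cases h2 : x = "goose".toList
    <;> by_cases h3 : x = "duck".toList <;> simp_all

theorem pv_swan : "swan".toList = ['s','w','a','n'] := rfl
theorem pv_goose : "goose".toList = ['g','o','o','s','e'] := rfl
theorem pv_duck : "duck".toList = ['d','u','c','k'] := rfl

-- ===== VERDICT (by name: the statement is the Claim_ definition above) =====
theorem validate_apartment_id_spec : Claim_equal_validate_apartment_id := by
  intro apt_id _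
  unfold Spec_validate_apartment_id validate_apartment_id validate_apartment_id_alt
  cases hs : PySem.Str.startswith apt_id "U" with
  | false => simp
  | true =>
    simp only [Bool.not_true, Bool.false_eq_true, if_false, pvScanA_eq]
    set rest := apt_id.toList.drop 1 with hrest
    set t := rest.takeWhile PySem.Chars.isdigit with ht
    set w := rest.dropWhile PySem.Chars.isdigit with hw
    have hwsuf : PySem.Chars.lower w <:+ PySem.Chars.lower rest :=
      pv_suffix_lower rest w (List.dropWhile_suffix _)
    rw [pv_bool_if, pv_contains_eq]
    simp only [pvCheckB, pv_swan, pv_goose, pv_duck]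
    cases h1 : PySem.Chars.endswith (PySem.Chars.lower rest) ['s','w','a','n'] with
    | true =>
      have hsuf1 : ['s','w','a','n'] <:+ PySem.Chars.lower rest :=
        (PySem.Chars.endswith_iff _ _).mp h1
      rw [if_pos rfl,
        pv_key rest ['s','w','a','n'] 's' ['w','a','n'] rfl
          (pv_not_digit_of_lower_letter (by decide)) hsuf1]
      have hgb : (PySem.Chars.lower w == ['g','o','o','s','e']) = false := by
        refine beq_eq_false_iff_ne.mpr fun hx => ?_
        exact pv_excl hsuf1 (hx ▸ hwsuf) (by decide) (by decide)
      have hdb : (PySem.Chars.lower w == ['d','u','c','k']) = false := by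
        refine beq_eq_false_iff_ne.mpr fun hx => ?_
        exact pv_excl hsuf1 (hx ▸ hwsuf) (by decide) (by decide)
      rw [← ht, ← hw]
      simp [hgb, hdb]
    | false =>
      rw [if_neg (by simp)]
      have hsb : (PySem.Chars.lower w == ['s','w','a','n']) = false := by
        refine beq_eq_false_iff_ne.mpr fun hx => ?_
        have he : PySem.Chars.endswith (PySem.Chars.lower rest) ['s','w','a','n'] = true :=
          (PySem.Chars.endswith_iff _ _).mpr (hx ▸ hwsuf)
        rw [h1] at he
        cases he
      cases h2 : PySem.Chars.endswith (PySem.Chars.lower rest) ['g','o','o','s','e'] with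
      | true =>
        have hsuf2 : ['g','o','o','s','e'] <:+ PySem.Chars.lower rest :=
          (PySem.Chars.endswith_iff _ _).mp h2
        rw [if_pos rfl,
          pv_key rest ['g','o','o','s','e'] 'g' ['o','o','s','e'] rfl
            (pv_not_digit_of_lower_letter (by decide)) hsuf2]
        have hdb : (PySem.Chars.lower w == ['d','u','c','k']) = false := by
          refine beq_eq_false_iff_ne.mpr fun hx => ?_
          exact pv_excl (hx ▸ hwsuf) hsuf2 (by decide) (by decide)
        rw [← ht, ← hw]
        simp [hsb, hdb]
      | false =>
        rw [if_neg (by simp)]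
        have hgb : (PySem.Chars.lower w == ['g','o','o','s','e']) = false := by
          refine beq_eq_false_iff_ne.mpr fun hx => ?_
          have he : PySem.Chars.endswith (PySem.Chars.lower rest) ['g','o','o','s','e'] = true :=
            (PySem.Chars.endswith_iff _ _).mpr (hx ▸ hwsuf)
          rw [h2] at he
          cases he
        cases h3 : PySem.Chars.endswith (PySem.Chars.lower rest) ['d','u','c','k'] with
        | true =>
          have hsuf3 : ['d','u','c','k'] <:+ PySem.Chars.lower rest :=
            (PySem.Chars.endswith_iff _ _).mp h3
          rw [if_pos rfl,
            pv_key rest ['d','u','c','k'] 'd' ['u','c','k'] rfl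
              (pv_not_digit_of_lower_letter (by decide)) hsuf3]
          rw [← ht, ← hw]
          simp [hsb, hgb]
        | false =>
          rw [if_neg (by simp)]
          have hdb : (PySem.Chars.lower w == ['d','u','c','k']) = false := by
            refine beq_eq_false_iff_ne.mpr fun hx => ?_
            have he : PySem.Chars.endswith (PySem.Chars.lower rest) ['d','u','c','k'] = true :=
              (PySem.Chars.endswith_iff _ _).mpr (hx ▸ hwsuf)
            rw [h3] at he
            cases he
          simp [hsb, hgb, hdb]
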